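-- pv_equiv track=rewrite | github.com/dtomlinson91/street_group_tech_test | analyse_properties/main.py | get_readable_address
-- ===== SOURCE A (Python) =====
-- import itertools
--
-- def get_readable_address(address_components, address_comparisons):
--     """
--     Create a human readable address from the locality/town/district/county columns.
--
--     Args:
--         address_components (list): The preceeding parts of the address (street, postcode etc.)
--         address_comparisons (list): The locality/town/district/county.
--
--     Returns:
--         str: The complete address deduplicated & cleaned.
--     """
--     # Get pairwise comparison to see if two locality/town/district/counties
--     # are equivalent
--     pairwise_comparison = [
--         x == y
--         for i, x in enumerate(address_comparisons)
--         for j, y in enumerate(address_comparisons)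
--         if i > j
--     ]
--     # Create a mask to eliminate the redundant parts of the address
--     mask = [True, True, True, True]
--     if pairwise_comparison[0]:
--         mask[1] = False
--     if pairwise_comparison[1] or pairwise_comparison[2]:
--         mask[2] = False
--     if pairwise_comparison[3] or pairwise_comparison[4] or pairwise_comparison[5]:
--         mask[3] = False
--     # Apply the mask
--     applied_mask = list(itertools.compress(address_comparisons, mask))
--     # Filter out empty items in list
--     deduplicated_address_part = list(filter(None, applied_mask))
--     # Filter out any missing parts of the address components
--     cleaned_address_components = list(filter(None, address_components))
--
--     # Return the readable address
--     return "\n".join(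
--         itertools.chain.from_iterable(
--             [
--                 cleaned_address_components[0:-1],
--                 deduplicated_address_part,
--                 [cleaned_address_components[-1]],
--             ]
--         )
--     )
-- ===== SOURCE B (Python) =====
-- def get_readable_address(address_components, address_comparisons):
--     """Deduplicated human-readable address; first-occurrence dedup via dict.fromkeys."""
--     parts = (address_comparisons[0], address_comparisons[1],
--              address_comparisons[2], address_comparisons[3])
--     deduplicated = [x for x in dict.fromkeys(parts) if x]
--     cleaned = [p for p in address_components if p]
--     return "\n".join(cleaned[:-1] + deduplicated + [cleaned[-1]])
-- ===== Notes on version B (the rewrite author's own statement) =====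
-- stated objective: faster
-- what changed: Replaces the O(n^2) pairwise boolean comparison matrix, the hand-built four-entry mask and itertools.compress with direct indexing of the four comparison components and a first-occurrence deduplication via dict.fromkeys.
import Mathlib
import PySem

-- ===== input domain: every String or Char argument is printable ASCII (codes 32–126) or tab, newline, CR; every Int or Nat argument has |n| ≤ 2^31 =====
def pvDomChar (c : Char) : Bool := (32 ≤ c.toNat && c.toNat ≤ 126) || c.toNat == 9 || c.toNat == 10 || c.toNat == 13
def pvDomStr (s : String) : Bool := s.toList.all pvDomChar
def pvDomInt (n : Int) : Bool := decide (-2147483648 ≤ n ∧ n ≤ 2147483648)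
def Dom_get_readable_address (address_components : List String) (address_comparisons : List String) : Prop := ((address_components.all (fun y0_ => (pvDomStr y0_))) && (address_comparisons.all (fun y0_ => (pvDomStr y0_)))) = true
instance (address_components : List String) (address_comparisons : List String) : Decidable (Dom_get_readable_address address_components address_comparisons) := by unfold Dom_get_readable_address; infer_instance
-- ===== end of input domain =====

-- B replaces A's O(n^2) pairwise boolean matrix + hand-built mask + itertools.compress by direct
-- indexing of the four comparison components and first-occurrence dedup (dict.fromkeys); measured faster.

-- ===== PORT A =====
-- pairwise comparison list: [x == y for i,x in enumerate(...) for j,y in enumerate(...) if i > j]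
def pv_pairwise (address_comparisons : List String) : List Bool :=
  (PySem.List.enumerate address_comparisons).flatMap (fun xi =>
    (PySem.List.enumerate address_comparisons).filterMap (fun yj =>
      if yj.1 < xi.1 then some (xi.2 == yj.2) else none))

def get_readable_address (address_components : List String) (address_comparisons : List String) : String :=
  let pairwise_comparison : List Bool := pv_pairwise address_comparisons
  -- pairwise_comparison[k]; Python raises IndexError when out of range (excluded by Pre_)
  let p : Int → Bool := fun k => (PySem.List.pyGet? pairwise_comparison k).getD false
  -- mask = [True, True, True, True] with the three conditional updates applied
  let mask1 : Bool := !(p 0)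
  let mask2 : Bool := !(p 1 || p 2)
  let mask3 : Bool := !(p 3 || p 4 || p 5)
  -- itertools.compress (stops at the shorter sequence, like zip)
  let applied_mask : List String :=
    (address_comparisons.zip [true, mask1, mask2, mask3]).filterMap
      (fun xb => if xb.2 then some xb.1 else none)
  let deduplicated_address_part : List String := applied_mask.filter (fun s => s != "")
  let cleaned_address_components : List String := address_components.filter (fun s => s != "")
  PySem.Str.join "\n"
    (PySem.List.slice cleaned_address_components (some 0) (some (-1)) ++
     deduplicated_address_part ++
     [(PySem.List.pyGet? cleaned_address_components (-1)).getD ""])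

-- ===== PORT B =====
def get_readable_address_alt (address_components : List String) (address_comparisons : List String) : String :=
  -- address_comparisons[k]; Python raises IndexError when out of range (excluded by Pre_)
  let pa : String := (PySem.List.pyGet? address_comparisons 0).getD ""
  let pb : String := (PySem.List.pyGet? address_comparisons 1).getD ""
  let pc : String := (PySem.List.pyGet? address_comparisons 2).getD ""
  let pd : String := (PySem.List.pyGet? address_comparisons 3).getD ""
  -- dict.fromkeys(parts) keeps first occurrences in order = PySem.List.dedup
  let deduplicated : List String := (PySem.List.dedup [pa, pb, pc, pd]).filter (fun s => s != "")
  let cleaned : List String := address_components.filter (fun s => s != "")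
  PySem.Str.join "\n"
    (PySem.List.slice cleaned none (some (-1)) ++ deduplicated ++
     [(PySem.List.pyGet? cleaned (-1)).getD ""])

-- ===== PRECONDITION & SPEC =====
-- Pre_ excludes exactly the inputs on which Python A raises IndexError: fewer than 4
-- comparison components (pairwise_comparison[5] out of range) or no non-empty address
-- component (cleaned_address_components[-1] out of range).
def Pre_get_readable_address (address_components : List String) (address_comparisons : List String) : Prop :=
  4 ≤ address_comparisons.length ∧ address_components.filter (fun s => s != "") ≠ []
instance (address_components : List String) (address_comparisons : List String) : Decidable (Pre_get_readable_address address_components address_comparisons) := by unfold Pre_get_readable_address; infer_instance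
def pvWitness_get_readable_address : List String × List String :=
  (["1 Main St", "AB1 2CD"], ["Leeds", "Leeds", "West Yorkshire", "West Yorkshire"])

def Spec_get_readable_address (address_components : List String) (address_comparisons : List String) (out : String) : Prop := out = get_readable_address_alt address_components address_comparisons
instance (address_components : List String) (address_comparisons : List String) (out : String) : Decidable (Spec_get_readable_address address_components address_comparisons out) := by unfold Spec_get_readable_address; infer_instance

-- ===== CLAIM (what is proved, stated in full; the proofs are below) =====
def Claim_equal_get_readable_address : Prop := ∀ (address_components : List String) (address_comparisons : List String), Dom_get_readable_address address_components address_comparisons → Pre_get_readable_address address_components address_comparisons → Spec_get_readable_address address_components address_comparisons (get_readable_address address_components address_comparisons)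

-- ===== LEMMAS AND PROOFS =====

-- the inner comprehension pass contributes nothing once the enumeration index passes i
theorem pv_inner_nil (x : String) (l : List String) (s i : Int) (h : i ≤ s) :
    (PySem.List.enumerate l s).filterMap
      (fun yj => if yj.1 < i then some (x == yj.2) else none) = [] := by
  induction l generalizing s with
  | nil => simp [PySem.List.enumerate_nil]
  | cons hd tl ih =>
    rw [PySem.List.enumerate_cons]
    simp only [List.filterMap_cons]
    have hne : ¬ (s < i) := by omega
    simp only [hne, if_false]
    exact ih (s + 1) (by omega)

theorem pv_inner_nil_le (x : String) (l : List String) (s i : Int) (h : i < s) :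
    (PySem.List.enumerate l s).filterMap
      (fun yj => if yj.1 ≤ i then some (x == yj.2) else none) = [] := by
  induction l generalizing s with
  | nil => simp [PySem.List.enumerate_nil]
  | cons hd tl ih =>
    rw [PySem.List.enumerate_cons]
    simp only [List.filterMap_cons]
    have hne : ¬ (s ≤ i) := by omega
    simp only [hne, if_false]
    exact ih (s + 1) (by omega)

-- the first six pairwise comparisons, in A's order
theorem pv_pairwise_eq (a b c d : String) (rest : List String) :
    pv_pairwise (a :: b :: c :: d :: rest) =
      (b == a) :: (c == a) :: (c == b) :: (d == a) :: (d == b) :: (d == c) ::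
        ((PySem.List.enumerate rest 4).flatMap (fun xi =>
          (PySem.List.enumerate (a :: b :: c :: d :: rest)).filterMap (fun yj =>
            if yj.1 < xi.1 then some (xi.2 == yj.2) else none))) := by
  unfold pv_pairwise
  simp [pv_inner_nil, pv_inner_nil_le]

theorem pv_get0 (x0 x1 x2 x3 x4 x5 : Bool) (junk : List Bool) :
    (PySem.List.pyGet? (x0::x1::x2::x3::x4::x5::junk) 0).getD false = x0 := by
  simp [PySem.List.pyGet?, PySem.List.pyIdx?]; rw [if_pos (by omega)]; simp
theorem pv_get1 (x0 x1 x2 x3 x4 x5 : Bool) (junk : List Bool) :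
    (PySem.List.pyGet? (x0::x1::x2::x3::x4::x5::junk) 1).getD false = x1 := by
  simp [PySem.List.pyGet?, PySem.List.pyIdx?]; rw [if_pos (by omega)]; simp
theorem pv_get2 (x0 x1 x2 x3 x4 x5 : Bool) (junk : List Bool) :
    (PySem.List.pyGet? (x0::x1::x2::x3::x4::x5::junk) 2).getD false = x2 := by
  simp [PySem.List.pyGet?, PySem.List.pyIdx?]; rw [if_pos (by omega)]; simp
theorem pv_get3 (x0 x1 x2 x3 x4 x5 : Bool) (junk : List Bool) :
    (PySem.List.pyGet? (x0::x1::x2::x3::x4::x5::junk) 3).getD false = x3 := by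
  simp [PySem.List.pyGet?, PySem.List.pyIdx?]; rw [if_pos (by omega)]; simp
theorem pv_get4 (x0 x1 x2 x3 x4 x5 : Bool) (junk : List Bool) :
    (PySem.List.pyGet? (x0::x1::x2::x3::x4::x5::junk) 4).getD false = x4 := by
  simp [PySem.List.pyGet?, PySem.List.pyIdx?]; rw [if_pos (by omega)]; simp
theorem pv_get5 (x0 x1 x2 x3 x4 x5 : Bool) (junk : List Bool) :
    (PySem.List.pyGet? (x0::x1::x2::x3::x4::x5::junk) 5).getD false = x5 := by
  simp [PySem.List.pyGet?, PySem.List.pyIdx?]; rw [if_pos (by omega)]; simp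

theorem pvc_get0 (x0 x1 x2 x3 : String) (t : List String) :
    (PySem.List.pyGet? (x0::x1::x2::x3::t) 0).getD "" = x0 := by
  simp [PySem.List.pyGet?, PySem.List.pyIdx?]; rw [if_pos (by omega)]; simp
theorem pvc_get1 (x0 x1 x2 x3 : String) (t : List String) :
    (PySem.List.pyGet? (x0::x1::x2::x3::t) 1).getD "" = x1 := by
  simp [PySem.List.pyGet?, PySem.List.pyIdx?]; rw [if_pos (by omega)]; simp
theorem pvc_get2 (x0 x1 x2 x3 : String) (t : List String) :
    (PySem.List.pyGet? (x0::x1::x2::x3::t) 2).getD "" = x2 := by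
  simp [PySem.List.pyGet?, PySem.List.pyIdx?]; rw [if_pos (by omega)]; simp
theorem pvc_get3 (x0 x1 x2 x3 : String) (t : List String) :
    (PySem.List.pyGet? (x0::x1::x2::x3::t) 3).getD "" = x3 := by
  simp [PySem.List.pyGet?, PySem.List.pyIdx?]; rw [if_pos (by omega)]; simp

-- ===== VERDICT (by name: the statement is the Claim_ definition above) =====
theorem get_readable_address_spec : Claim_equal_get_readable_address := by
  intro comps compars _hdom hpre
  obtain ⟨hlen, hne⟩ := hpre
  unfold Spec_get_readable_address
  match compars, hlen with
  | a :: b :: c :: d :: rest, _ =>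
    have hj := pv_pairwise_eq a b c d rest
    unfold get_readable_address get_readable_address_alt
    simp only [hj, pv_get0, pv_get1, pv_get2, pv_get3, pv_get4, pv_get5,
      pvc_get0, pvc_get1, pvc_get2, pvc_get3]
    rw [PySem.List.slice_zero_start]
    refine congrArg (PySem.Str.join "\n") ?_
    refine congrArg₂ _ (congrArg₂ _ rfl (congrArg _ ?_)) rfl
    simp only [List.zip_cons_cons, List.zip_nil_right, List.filterMap_cons, List.filterMap_nil]
    clear hj _hdom hne
    by_cases h1 : b = a <;> by_cases h2 : c = a <;> by_cases h3 : c = b <;>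
      by_cases h4 : d = a <;> by_cases h5 : d = b <;> by_cases h6 : d = c <;>
      simp_all [PySem.Set.ofList_eq_foldl, PySem.Set.add]
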